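-- pv_equiv track=rewrite | github.com/Mirroxum/algorithms-templates | python/sprint1_nonfinals/l.py | get_excessive_letter
-- ===== SOURCE A (Python) =====
-- def get_excessive_letter(shorter: str, longer: str) -> str:
--     list_short = list(shorter)
--     list_longer = list(longer)
--     for i in list_longer:
--         if i in list_short:
--             list_short.remove(i)
--         else:
--             return i
-- ===== SOURCE B (Python) =====
-- def get_excessive_letter(shorter: str, longer: str) -> str:
--     # Stateless characterization: the answer is the first position i in longer
--     # at which the occurrences of longer[i] within longer[:i+1] outnumber its
--     # occurrences in shorter. No multiset is consumed and no state is carried.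
--     for i, c in enumerate(longer):
--         if longer[: i + 1].count(c) > shorter.count(c):
--             return c
-- ===== Notes on version B (the rewrite author's own statement) =====
-- stated objective: alternative
-- what changed: Replaces A's stateful consumption of a shrinking copy of shorter (membership test + remove per step) by a stateless per-position test: return the first char of longer whose occurrence count in the current prefix of longer exceeds its count in shorter; no list is mutated and no running state is kept.
-- outside the precondition, e.g. on get_excessive_letter('ab', 'ab'): A returns None, B returns None
import Mathlib
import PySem

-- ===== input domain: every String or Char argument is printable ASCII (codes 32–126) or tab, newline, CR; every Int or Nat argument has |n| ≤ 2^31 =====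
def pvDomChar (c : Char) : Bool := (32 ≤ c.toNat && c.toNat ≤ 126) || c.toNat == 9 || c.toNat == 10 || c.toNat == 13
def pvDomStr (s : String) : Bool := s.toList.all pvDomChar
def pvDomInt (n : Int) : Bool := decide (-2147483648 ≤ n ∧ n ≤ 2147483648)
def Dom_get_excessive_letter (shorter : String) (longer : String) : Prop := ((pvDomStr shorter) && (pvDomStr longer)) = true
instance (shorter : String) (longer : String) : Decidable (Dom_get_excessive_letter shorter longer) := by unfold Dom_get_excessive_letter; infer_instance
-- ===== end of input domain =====

-- B replaces A's stateful consumption of a shrinking copy of shorter by a stateless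
-- per-position prefix-count test; equivalence of the RETURN value is proved on Pre_
-- (where A returns a str).

-- ===== PORT A =====
-- 'for i in list_longer: if i in list_short: list_short.remove(i) else: return i'.
-- list.remove on a present element = List.erase (exact: first occurrence; presence guaranteed by the guard).
-- The exhausted loop ("" here) is Python's implicit 'return None', excluded by Pre_.
def gelA_loop : List Char → List Char → String
  | _, [] => ""
  | ls, i :: rest => if ls.contains i then gelA_loop (ls.erase i) rest else String.ofList [i]

def get_excessive_letter (shorter : String) (longer : String) : String :=
  gelA_loop shorter.toList longer.toList

-- ===== PORT B =====
-- 'for i, c in enumerate(longer): if longer[:i+1].count(c) > shorter.count(c): return c'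
-- as index-carrying recursion; the slice longer[:i+1] with i+1 ≥ 0 is List.take (i+1),
-- and str.count of a single char is the char count of the character list (exact here).
def gelB_loop (shorter longer : List Char) : Nat → List Char → String
  | _, [] => ""
  | i, c :: rest =>
    if shorter.count c < (longer.take (i + 1)).count c then String.ofList [c]
    else gelB_loop shorter longer (i + 1) rest

def get_excessive_letter_alt (shorter : String) (longer : String) : String :=
  gelB_loop shorter.toList longer.toList 0 longer.toList

-- ===== PRECONDITION & SPEC =====
-- Pre_ excludes inputs where every letter of longer is matched (with multiplicity) in shorter:
-- there A's Python 'return i' never fires and A returns None, not a str (B likewise returns None).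
def Pre_get_excessive_letter (shorter : String) (longer : String) : Prop :=
  (longer.toList.any (fun c => decide (shorter.toList.count c < longer.toList.count c))) = true
instance (shorter : String) (longer : String) : Decidable (Pre_get_excessive_letter shorter longer) := by unfold Pre_get_excessive_letter; infer_instance
def pvWitness_get_excessive_letter : String × String := ("", "z")

def Spec_get_excessive_letter (shorter : String) (longer : String) (out : String) : Prop := out = get_excessive_letter_alt shorter longer
instance (shorter : String) (longer : String) (out : String) : Decidable (Spec_get_excessive_letter shorter longer out) := by unfold Spec_get_excessive_letter; infer_instance

-- ===== CLAIM (what is proved, stated in full; the proofs are below) =====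
def Claim_equal_get_excessive_letter : Prop := ∀ (shorter : String) (longer : String), Dom_get_excessive_letter shorter longer → Pre_get_excessive_letter shorter longer → Spec_get_excessive_letter shorter longer (get_excessive_letter shorter longer)

-- ===== LEMMAS AND PROOFS =====

-- Invariant, A's list state vs B's prefix: with longer = p ++ rest processed up to p,
-- A's remaining list ls satisfies p.count c + ls.count c = shorter.count c for every c.
lemma gel_loop_eq : ∀ (rest p ls shorter longer : List Char),
    longer = p ++ rest →
    (∀ c, p.count c + ls.count c = shorter.count c) →
    gelA_loop ls rest = gelB_loop shorter longer p.length rest := by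
  intro rest
  induction rest with
  | nil => intro p ls shorter longer _ _; rfl
  | cons i rest ih =>
    intro p ls shorter longer hsplit hinv
    simp only [gelA_loop, gelB_loop]
    have htake : longer.take (p.length + 1) = p ++ [i] := by
      subst hsplit
      simp [List.take_append]
    have hcnt : (longer.take (p.length + 1)).count i = p.count i + 1 := by
      rw [htake, List.count_append]
      simp
    have hkey := hinv i
    by_cases hmem : ls.contains i
    · have hpos : 0 < ls.count i := List.count_pos_iff.mpr (by simpa using hmem)
      rw [if_pos hmem, if_neg (by rw [hcnt]; omega)]
      have := ih (p ++ [i]) (ls.erase i) shorter longer (by simp [hsplit]) ?_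
      · simpa using this
      · intro c
        rw [List.count_append]
        by_cases hc : c = i
        · subst hc
          rw [List.count_erase_self]
          have h1 := hinv c
          have h2 : List.count c [c] = 1 := by simp
          rw [h2]
          have := hpos
          omega
        · have hs : List.count c [i] = 0 := List.count_eq_zero.mpr (by simp [hc])
          rw [List.count_erase_of_ne (fun h => hc h), hs]
          have h1 := hinv c
          omega
    · have hz : ls.count i = 0 := by
        by_contra h
        exact hmem (List.contains_iff_mem.mpr (List.count_pos_iff.mp (Nat.pos_of_ne_zero h)))
      rw [if_neg hmem, if_pos (by rw [hcnt]; omega)]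

-- ===== VERDICT (by name: the statement is the Claim_ definition above) =====
theorem get_excessive_letter_spec : Claim_equal_get_excessive_letter := by
  intro shorter longer _ _
  unfold Spec_get_excessive_letter get_excessive_letter get_excessive_letter_alt
  exact gel_loop_eq longer.toList [] shorter.toList shorter.toList longer.toList rfl
    (fun c => by simp)
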